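-- pv_equiv track=rewrite | github.com/JarretNachtigal/python-sandbox | hackerrank_6_14_2022.py | get_vowel_substrings
-- ===== SOURCE A (Python) =====
-- def get_vowel_substrings(string):
--     vowels = ["a", "e", "i", "o", 'u']
--     substrings = []
--     length = len(string)
--     for letter in vowels:  # loop through vowels to check if they exist
--         if string.count(letter) > 0:  # if they exist
--             substrings.append(letter)  # add vowel to substrings
--             i = string.index(letter) + 1  # set i to index of vowel + 1
--             while i < length:  # add remaining substrings after the vowel
--                 # add previous substring + next letter
--                 substrings.append(substrings[len(substrings) - 1] + string[i])
--                 i += 1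
--
--     return substrings
-- ===== SOURCE B (Python) =====
-- def get_vowel_substrings(string):
--     result = []
--     n = len(string)
--     for v in "aeiou":
--         idx = string.find(v)
--         if idx != -1:
--             result.extend(string[idx:j] for j in range(idx + 1, n + 1))
--     return result
-- ===== Notes on version B (the rewrite author's own statement) =====
-- stated objective: simpler
-- what changed: B replaces A's chained accumulator (substrings[-1] + string[i] inside a manual while loop) by computing each output independently as a slice string[idx:j] over a range, using str.find instead of count+index.
import Mathlib
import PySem

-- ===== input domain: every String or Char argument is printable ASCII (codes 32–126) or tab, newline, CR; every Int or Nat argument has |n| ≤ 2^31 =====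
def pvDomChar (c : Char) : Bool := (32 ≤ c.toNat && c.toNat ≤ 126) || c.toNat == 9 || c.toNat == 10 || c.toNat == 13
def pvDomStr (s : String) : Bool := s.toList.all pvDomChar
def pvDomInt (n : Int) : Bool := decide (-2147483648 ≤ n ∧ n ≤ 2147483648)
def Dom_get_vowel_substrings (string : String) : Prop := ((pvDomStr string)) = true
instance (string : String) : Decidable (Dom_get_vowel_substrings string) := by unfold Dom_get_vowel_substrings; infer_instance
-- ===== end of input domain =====

-- B builds each substring independently as a slice string[idx:j]; A chains each one from the
-- previous with substrings[-1] + string[i]. Same values, simpler decomposition.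

-- ===== PORT A =====
-- A's inner `while i < length: substrings.append(substrings[len(substrings)-1] + string[i]); i += 1`.
-- substrings[len(substrings)-1] is pyGet?; its `.getD []` default is unreachable: the list is
-- nonempty whenever the loop is entered (a vowel was just appended).
def pvAwhile (s : List Char) (substrings : List (List Char)) (i : Nat) : List (List Char) :=
  if h : i < s.length then
    pvAwhile s
      (substrings ++
        [((PySem.List.pyGet? substrings ((substrings.length : Int) - 1)).getD []) ++ [s[i]]])
      (i + 1)
  else substrings
termination_by s.length - i

def get_vowel_substrings (string : String) : List String :=
  let vowels : List Char := ['a', 'e', 'i', 'o', 'u']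
  let s := string.toList
  -- `string.index(letter)` is Chars.find (equal, since the guard `count > 0` holds); `i` starts at index + 1
  ((vowels.foldl (fun substrings letter =>
      if PySem.Chars.count s [letter] > 0 then
        pvAwhile s (substrings ++ [[letter]]) ((PySem.Chars.find s [letter]).toNat + 1)
      else substrings) [])).map String.ofList

-- ===== PORT B =====
def get_vowel_substrings_alt (string : String) : List String :=
  let s := string.toList
  let n := s.length
  ("aeiou".toList).foldl (fun result v =>
    let idx := PySem.Chars.find s [v]
    if idx ≠ -1 then
      result ++ (PySem.List.pyRange (idx + 1) ((n : Int) + 1)).map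
        (fun j => String.ofList (PySem.List.slice s (some idx) (some j)))
    else result) []

-- ===== PRECONDITION & SPEC =====
def Spec_get_vowel_substrings (string : String) (out : List String) : Prop := out = get_vowel_substrings_alt string
instance (string : String) (out : List String) : Decidable (Spec_get_vowel_substrings string out) := by unfold Spec_get_vowel_substrings; infer_instance

-- ===== CLAIM (what is proved, stated in full; the proofs are below) =====
def Claim_equal_get_vowel_substrings : Prop := ∀ (string : String), Dom_get_vowel_substrings string → Spec_get_vowel_substrings string (get_vowel_substrings string)

-- ===== LEMMAS AND PROOFS =====

theorem pvAwhile_spec (s : List Char) (i : Nat) (subs : List (List Char)) (last : List Char) :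
    pvAwhile s (subs ++ [last]) i
      = (subs ++ [last]) ++ (List.range (s.length - i)).map
          (fun k => last ++ ((s.drop i).take (k + 1))) := by
  have key : ∀ (d i : Nat), s.length - i ≤ d → ∀ (subs : List (List Char)) (last : List Char),
      pvAwhile s (subs ++ [last]) i
        = (subs ++ [last]) ++ (List.range (s.length - i)).map
            (fun k => last ++ ((s.drop i).take (k + 1))) := by
    intro d
    induction d with
    | zero =>
      intro i hd subs last
      have h : ¬ i < s.length := by omega
      rw [pvAwhile, dif_neg h]
      have : s.length - i = 0 := by omega
      simp [this]
    | succ d ih =>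
      intro i hd subs last
      by_cases h : i < s.length
      · rw [pvAwhile, dif_pos h]
        have hlast : ((PySem.List.pyGet? (subs ++ [last])
            (((subs ++ [last]).length : Int) - 1)).getD []) = last := by
          have he : (((subs ++ [last]).length : Int) - 1) = ((subs.length : Nat) : Int) := by
            simp
          rw [he, PySem.List.pyGet?_natCast]
          simp
        rw [hlast]
        have := ih (i + 1) (by omega) (subs ++ [last]) (last ++ [s[i]])
        rw [this]
        have hn : s.length - i = (s.length - (i + 1)) + 1 := by omega
        rw [hn, List.range_succ_eq_map, List.map_cons, List.map_map]
        have hdropi : s.drop i = s[i] :: s.drop (i + 1) := List.drop_eq_getElem_cons h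
        rw [List.append_assoc]
        congr 1
        simp only [Function.comp_def, hdropi, List.take_succ_cons]
        simp
      · rw [pvAwhile, dif_neg h]
        have : s.length - i = 0 := by omega
        simp [this]
  exact key (s.length - i) i le_rfl subs last

theorem pvPyRange_nat (d : Nat) : ∀ (a : Nat),
    PySem.List.pyRange (a : Int) ((a + d : Nat) : Int)
      = (List.range d).map (fun k => ((a + k : Nat) : Int)) := by
  induction d with
  | zero => intro a; exact PySem.List.pyRange_one_eq_nil (by simp)
  | succ d ih =>
    intro a
    rw [PySem.List.pyRange_one_cons (by omega)]
    have h1 : ((a : Int) + 1) = (((a + 1 : Nat) : Int)) := by push_cast; ring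
    have h2 : ((a + (d + 1) : Nat) : Int) = (((a + 1) + d : Nat) : Int) := by push_cast; ring
    rw [h1, h2, ih (a + 1), List.range_succ_eq_map, List.map_cons, List.map_map]
    refine congrArg₂ _ (by norm_num) (List.map_congr_left ?_)
    intro k _; simp; omega

theorem pvCount_go_singleton (c : Char) (fuel : Nat) :
    ∀ (l : List Char) (acc : Nat),
      PySem.Chars.count.go [c] fuel l acc = acc + (l.take fuel).count c := by
  induction fuel with
  | zero => intro l acc; cases l <;> simp [PySem.Chars.count.go]
  | succ fuel ih =>
    intro l acc
    cases l with
    | nil => simp [PySem.Chars.count.go]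
    | cons h t =>
      by_cases hc : h = c
      · subst hc
        simp [PySem.Chars.count.go, List.isPrefixOf, ih]
        omega
      · simp [PySem.Chars.count.go, List.isPrefixOf, hc, ih, Ne.symm hc]

theorem pvCount_singleton (s : List Char) (c : Char) :
    PySem.Chars.count s [c] = s.count c := by
  simp [PySem.Chars.count, pvCount_go_singleton]

theorem pvFold (s : List Char) : ∀ (vs : List Char) (subs : List (List Char)),
    vs.foldl (fun result v =>
        let idx := PySem.Chars.find s [v]
        if idx ≠ -1 then
          result ++ (PySem.List.pyRange (idx + 1) ((s.length : Int) + 1)).map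
            (fun j => String.ofList (PySem.List.slice s (some idx) (some j)))
        else result) (subs.map String.ofList)
      = (vs.foldl (fun substrings letter =>
          if PySem.Chars.count s [letter] > 0 then
            pvAwhile s (substrings ++ [[letter]]) ((PySem.Chars.find s [letter]).toNat + 1)
          else substrings) subs).map String.ofList := by
  intro vs
  induction vs with
  | nil => intro subs; simp
  | cons c vs ih =>
    intro subs
    simp only [List.foldl_cons]
    by_cases hc : c ∈ s
    · -- the vowel occurs
      have hinf : [c] <:+: s := (List.singleton_infix_iff c s).mpr hc
      have hfind : 0 ≤ PySem.Chars.find s [c] := (PySem.Chars.find_nonneg_iff s [c]).mpr hinf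
      set m := (PySem.Chars.find s [c]).toNat with hm
      have hfm : PySem.Chars.find s [c] = (m : Int) := by omega
      have hpre : [c] <+: s.drop m := (PySem.Chars.find_spec hfind).1
      obtain ⟨t, ht⟩ := hpre
      have hdrop : s.drop m = c :: s.drop (m + 1) := by
        rw [← List.tail_drop, ← ht]; simp
      have hmlt : m < s.length := by
        by_contra hge
        have hnil : s.drop m = [] := List.drop_eq_nil_of_le (by omega)
        rw [hnil] at hdrop; simp at hdrop
      -- A's branch
      have hcount : PySem.Chars.count s [c] > 0 := by
        rw [pvCount_singleton]; exact List.count_pos_iff.mpr hc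
      rw [if_pos hcount, hfm]
      -- B's branch
      rw [if_pos (show (m : Int) ≠ -1 by omega)]
      have hnm : s.length - m = (s.length - (m + 1)) + 1 := by omega
      have hblock : (subs.map String.ofList) ++
            (PySem.List.pyRange ((m : Int) + 1) ((s.length : Int) + 1)).map
              (fun j => String.ofList (PySem.List.slice s (some (m : Int)) (some j)))
          = (pvAwhile s (subs ++ [[c]]) (m + 1)).map String.ofList := by
        rw [pvAwhile_spec, List.append_assoc, List.map_append]
        congr 1
        rw [List.map_append]
        have hc1 : ((m : Int) + 1) = (((m + 1 : Nat)) : Int) := by push_cast; ring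
        have hc2 : ((s.length : Int) + 1) = ((((m + 1) + (s.length - m) : Nat)) : Int) := by
          push_cast; omega
        rw [hc1, hc2, pvPyRange_nat, List.map_map, hnm, List.range_succ_eq_map, List.map_cons,
          List.map_map, List.map_cons]
        have hsub : ∀ k : Nat, (m + 1 + k) - m = k + 1 := by omega
        simp only [Function.comp_def, PySem.List.slice_natCast, hsub, hdrop,
          List.take_succ_cons, List.map_nil, List.singleton_append, List.map_map]
        simp
      rw [hblock]
      exact ih _
    · -- the vowel does not occur
      have hinf : ¬ [c] <:+: s := by
        rw [List.singleton_infix_iff]; exact hc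
      have hfind : PySem.Chars.find s [c] = -1 := (PySem.Chars.find_eq_neg_one_iff s [c]).mpr hinf
      have hcount : ¬ PySem.Chars.count s [c] > 0 := by
        rw [pvCount_singleton]; simp [List.count_eq_zero_of_not_mem hc]
      rw [if_neg hcount, hfind]
      simp only [ne_eq, not_true_eq_false, if_false]
      exact ih subs

-- ===== VERDICT (by name: the statement is the Claim_ definition above) =====
theorem get_vowel_substrings_spec : Claim_equal_get_vowel_substrings := by
  intro string _
  unfold Spec_get_vowel_substrings get_vowel_substrings get_vowel_substrings_alt
  have hv : "aeiou".toList = ['a', 'e', 'i', 'o', 'u'] := rfl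
  rw [hv]
  exact (pvFold string.toList ['a', 'e', 'i', 'o', 'u'] []).symm
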